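-- pv_equiv track=rewrite | github.com/JeremCab/DevEfficaceBUT | TPs/TP_2/tris_CORR.py | sous_tableaux_monotones
-- ===== SOURCE A (Python) =====
-- def sous_tableaux_monotones(tab):
--     """renvoie une liste des sous-tableaux monotones qui constituent tab
--
--     Args:
--         tab (list): un tableau d'éléments comparables
--
--     Returns:
--         list : liste de list (sous-tableaux)
--     """
--
--     result = [[]]
--
--     for e in tab:
--
--         sous_tab = result[-1]
--
--         # si monotone, on remplit le sous-tableau
--         if len(sous_tab) <= 1 or (e - sous_tab[-1]) * (sous_tab[-1] - sous_tab[-2]) > 0: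
--             sous_tab.append(e)
--
--         # si non-monotone, on rajoute le sous-tableau et on en crée un nouveau
--         else:
--             if sous_tab[-2] > sous_tab[-1]: # si décroissant, on permute
--                 sous_tab.reverse()
--
--             result.append([e])
--
--     # dernier sous-tableau
--     if len(result[-1]) <= 1 or result[-1][-2] > result[-1][-1]:
--         result[-1].reverse()
--
--     return result
-- ===== SOURCE B (Python) =====
-- def sous_tableaux_monotones(tab):
--     """Index-based re-implementation: compute each maximal monotone run's end
--     by scanning consecutive differences, slice it out of tab, and reverse the
--     decreasing slices; no incremental list-of-lists mutation."""
--     n = len(tab)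
--     if n == 0:
--         return [[]]
--     res = []
--     start = 0
--     while start < n:
--         end = start + 1
--         while end < n and (end - start <= 1 or (tab[end] - tab[end-1]) * (tab[end-1] - tab[end-2]) > 0):
--             end += 1
--         run = tab[start:end]
--         if len(run) >= 2 and run[0] > run[1]:
--             run.reverse()
--         res.append(run)
--         start = end
--     return res
-- ===== Notes on version B (the rewrite author's own statement) =====
-- stated objective: alternative
-- what changed: A builds the result by mutating the last sublist of a growing list-of-lists, reversing a run in place the moment it breaks and patching the final run after the loop; B instead scans indices to find each maximal monotone run's end, slices the run directly out of tab, and uniformly reverses any slice that starts decreasing.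
import Mathlib
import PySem

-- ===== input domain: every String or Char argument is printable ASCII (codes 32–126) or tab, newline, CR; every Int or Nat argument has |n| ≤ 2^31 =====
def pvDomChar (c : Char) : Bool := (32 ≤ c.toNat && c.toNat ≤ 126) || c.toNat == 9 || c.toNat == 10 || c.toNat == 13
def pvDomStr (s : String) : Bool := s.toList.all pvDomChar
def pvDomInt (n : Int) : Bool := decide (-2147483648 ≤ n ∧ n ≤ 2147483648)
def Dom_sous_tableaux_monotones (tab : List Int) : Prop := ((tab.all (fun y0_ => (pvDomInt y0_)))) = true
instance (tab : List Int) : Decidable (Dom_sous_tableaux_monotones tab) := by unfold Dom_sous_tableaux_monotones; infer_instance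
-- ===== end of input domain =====

-- B replaces A's interleaved mutate-the-last-sublist loop by an index scan that finds each
-- maximal monotone run's end, slices it out of tab and reverses decreasing slices (objective: alternative).

-- ===== PORT A =====
-- State encoding: (finished runs, most recent first; current run, most recent element first).
-- Python's result[-1] / .append() become head access / cons under this standard reversed
-- encoding; pvFinA re-reverses to Python's order, including the post-loop last-run handling.
def pvStepA (st : List (List Int) × List Int) (e : Int) : List (List Int) × List Int :=
  match st with
  | (fin, cur) =>
    match cur with
    | [] => (fin, [e])
    | [a] => (fin, [e, a])
    | a :: b :: rest =>
      if (e - a) * (a - b) > 0 then (fin, e :: a :: b :: rest)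
      else
        let run := if b > a then a :: b :: rest else (a :: b :: rest).reverse
        (run :: fin, [e])

def pvFinA (st : List (List Int) × List Int) : List (List Int) :=
  match st with
  | (fin, cur) =>
    let last :=
      match cur with
      | a :: b :: rest => if b > a then a :: b :: rest else (a :: b :: rest).reverse
      | c => c
    (last :: fin).reverse

def sous_tableaux_monotones (tab : List Int) : List (List Int) :=
  pvFinA (tab.foldl pvStepA ([], []))

-- ===== PORT B =====
-- inner while of Source B: advance `end` while the next element continues the monotone run
-- (all accesses are in range, so List.getD is exact for tab[...])
def pvInnerB (tab : List Int) (start e : Nat) : Nat :=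
  if h : e < tab.length ∧ (e - start ≤ 1 ∨
      (tab.getD e 0 - tab.getD (e-1) 0) * (tab.getD (e-1) 0 - tab.getD (e-2) 0) > 0)
  then pvInnerB tab start (e+1)
  else e
termination_by tab.length - e
decreasing_by omega

-- needed by pvOuterB's termination proof
theorem pvInnerB_ge (tab : List Int) (start e : Nat) : e ≤ pvInnerB tab start e := by
  fun_induction pvInnerB tab start e with
  | case1 e h ih => omega
  | case2 e h => omega

-- Source B's normalization of one slice: reverse it when it starts decreasing
def pvNormB (run : List Int) : List Int :=
  if 2 ≤ run.length ∧ run.getD 0 0 > run.getD 1 0 then run.reverse else run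

-- outer while of Source B; tab[start:end] is the in-range slice, i.e. drop/take
def pvOuterB (tab : List Int) (start : Nat) : List (List Int) :=
  if h : start < tab.length then
    let e := pvInnerB tab start (start+1)
    pvNormB ((tab.drop start).take (e - start)) :: pvOuterB tab e
  else []
termination_by tab.length - start
decreasing_by
  have := pvInnerB_ge tab start (start+1)
  omega

def sous_tableaux_monotones_alt (tab : List Int) : List (List Int) :=
  if tab.length = 0 then [[]] else pvOuterB tab 0

-- ===== PRECONDITION & SPEC =====
def Spec_sous_tableaux_monotones (tab : List Int) (out : List (List Int)) : Prop := out = sous_tableaux_monotones_alt tab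
instance (tab : List Int) (out : List (List Int)) : Decidable (Spec_sous_tableaux_monotones tab out) := by unfold Spec_sous_tableaux_monotones; infer_instance

-- ===== CLAIM (what is proved, stated in full; the proofs are below) =====
def Claim_equal_sous_tableaux_monotones : Prop := ∀ (tab : List Int), Dom_sous_tableaux_monotones tab → Spec_sous_tableaux_monotones tab (sous_tableaux_monotones tab)

-- ===== LEMMAS AND PROOFS =====

-- the slice tab[s:e]
def pvSeg (tab : List Int) (s e : Nat) : List Int := (tab.drop s).take (e - s)

theorem pvSeg_snoc (tab : List Int) (s e : Nat) (h1 : s ≤ e) (h2 : e < tab.length) :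
    pvSeg tab s (e+1) = pvSeg tab s e ++ [tab.getD e 0] := by
  unfold pvSeg
  have h3 : e + 1 - s = (e - s) + 1 := by omega
  rw [h3, List.take_add_one]
  congr 1
  rw [List.getElem?_drop]
  have h4 : s + (e - s) = e := by omega
  rw [h4, List.getElem?_eq_getElem h2]
  simp [List.getD, List.getElem?_eq_getElem h2]

theorem pvSeg_getD (tab : List Int) (s e i : Nat) (h : s + i < e) (h2 : e ≤ tab.length) :
    (pvSeg tab s e).getD i 0 = tab.getD (s + i) 0 := by
  unfold pvSeg
  rw [List.getD, List.getD, List.getElem?_take_of_lt (by omega), List.getElem?_drop]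

theorem pvSeg_len (tab : List Int) (s e : Nat) (h1 : s ≤ e) (h2 : e ≤ tab.length) :
    (pvSeg tab s e).length = e - s := by
  simp [pvSeg]; omega

-- strict monotonicity propagates: the first step of a run decreases iff its last step does
theorem pvSign (tab : List Int) (start : Nat) :
    ∀ (e : Nat), start + 2 ≤ e →
    (∀ i, start ≤ i → i + 2 < e →
      (tab.getD (i+1) 0 - tab.getD i 0) * (tab.getD (i+2) 0 - tab.getD (i+1) 0) > 0) →
    (tab.getD start 0 > tab.getD (start+1) 0 ↔ tab.getD (e-2) 0 > tab.getD (e-1) 0) := by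
  intro e he
  induction e, he using Nat.le_induction with
  | base =>
    intro _
    have h1 : start + 2 - 2 = start := by omega
    have h2 : start + 2 - 1 = start + 1 := by omega
    rw [h1, h2]
  | succ e he ih =>
    intro inv
    have hih := ih (fun i hi hlt => inv i hi (by omega))
    have hp := inv (e - 2) (by omega) (by omega)
    have e1 : e - 2 + 1 = e - 1 := by omega
    have e2 : e - 2 + 2 = e := by omega
    have e3 : e + 1 - 2 = e - 1 := by omega
    have e4 : e + 1 - 1 = e := by omega
    rw [e1, e2] at hp
    rw [e3, e4]
    rw [hih]
    rcases mul_pos_iff.mp hp with ⟨ha, hb⟩ | ⟨ha, hb⟩ <;> constructor <;> intro <;> omega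

theorem pvSeg_rev_shape (tab : List Int) (start e : Nat) (h : start + 2 ≤ e) (h2 : e ≤ tab.length) :
    (pvSeg tab start e).reverse
      = tab.getD (e-1) 0 :: tab.getD (e-2) 0 :: (pvSeg tab start (e-2)).reverse := by
  obtain ⟨m, rfl⟩ : ∃ m, e = m + 2 := ⟨e - 2, by omega⟩
  rw [show m + 2 = (m + 1) + 1 from rfl,
      pvSeg_snoc tab start (m+1) (by omega) (by omega),
      pvSeg_snoc tab start m (by omega) (by omega)]
  simp

-- B's first/second-element test agrees with A's last/second-last test on a monotone run
theorem pvNorm_eq (tab : List Int) (start e : Nat) (h : start + 2 ≤ e) (h2 : e ≤ tab.length)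
    (inv : ∀ i, start ≤ i → i + 2 < e →
      (tab.getD (i+1) 0 - tab.getD i 0) * (tab.getD (i+2) 0 - tab.getD (i+1) 0) > 0) :
    pvNormB (pvSeg tab start e)
      = if tab.getD (e-2) 0 > tab.getD (e-1) 0 then (pvSeg tab start e).reverse
        else pvSeg tab start e := by
  have hs := pvSign tab start e h inv
  unfold pvNormB
  rw [pvSeg_len tab start e (by omega) h2]
  have g0 : (pvSeg tab start e).getD 0 0 = tab.getD start 0 := by
    have := pvSeg_getD tab start e 0 (by omega) h2; simpa using this
  have g1 : (pvSeg tab start e).getD 1 0 = tab.getD (start+1) 0 := by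
    have := pvSeg_getD tab start e 1 (by omega) h2; simpa using this
  rw [g0, g1]
  have hc : (2 ≤ e - start ∧ tab.getD start 0 > tab.getD (start+1) 0)
      ↔ (tab.getD (e-2) 0 > tab.getD (e-1) 0) :=
    ⟨fun ⟨_, hx⟩ => hs.mp hx, fun hx => ⟨by omega, hs.mpr hx⟩⟩
  rw [if_congr hc rfl rfl]

theorem pvSeg_singleton (tab : List Int) (s : Nat) (h : s < tab.length) :
    pvSeg tab s (s+1) = [tab.getD s 0] := by
  rw [pvSeg_snoc tab s s (by omega) h]
  simp [pvSeg]

-- main invariant: continuing A's loop from a partially built run tab[start:e] matches B's scan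
theorem pvMain (tab : List Int) : ∀ k start e fin,
    start < e → e ≤ tab.length → tab.length - e = k →
    (∀ i, start ≤ i → i + 2 < e →
      (tab.getD (i+1) 0 - tab.getD i 0) * (tab.getD (i+2) 0 - tab.getD (i+1) 0) > 0) →
    pvFinA ((tab.drop e).foldl pvStepA (fin, (pvSeg tab start e).reverse))
      = fin.reverse ++ pvNormB (pvSeg tab start (pvInnerB tab start e)) :: pvOuterB tab (pvInnerB tab start e) := by
  intro k
  induction k using Nat.strong_induction_on with
  | _ k IH =>
  intro start e fin h1 h2 h3 inv
  by_cases he : e < tab.length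
  · -- step case: e < length
    have hdrop : tab.drop e = tab.getD e 0 :: tab.drop (e+1) := by
      rw [List.getD_eq_getElem tab 0 he, List.drop_eq_getElem_cons he]
    rw [hdrop, List.foldl_cons]
    by_cases hcond : e - start ≤ 1 ∨
        (tab.getD e 0 - tab.getD (e-1) 0) * (tab.getD (e-1) 0 - tab.getD (e-2) 0) > 0
    · -- run continues at e
      have hinner : pvInnerB tab start e = pvInnerB tab start (e+1) := by
        conv_lhs => unfold pvInnerB
        rw [dif_pos ⟨he, hcond⟩]
      have hstep : pvStepA (fin, (pvSeg tab start e).reverse) (tab.getD e 0)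
          = (fin, (pvSeg tab start (e+1)).reverse) := by
        rw [pvSeg_snoc tab start e (by omega) he, List.reverse_append]
        by_cases hl : start + 2 ≤ e
        · rw [pvSeg_rev_shape tab start e hl h2]
          have hp : (tab.getD e 0 - tab.getD (e-1) 0) * (tab.getD (e-1) 0 - tab.getD (e-2) 0) > 0 := by
            rcases hcond with hx | hx
            · omega
            · exact hx
          simp only [pvStepA, if_pos hp, List.reverse_cons]
          rfl
        · have hes : e = start + 1 := by omega
          subst hes
          rw [pvSeg_singleton tab start (by omega)]
          rfl
      rw [hstep]
      have hext : ∀ i, start ≤ i → i + 2 < e + 1 →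
          (tab.getD (i+1) 0 - tab.getD i 0) * (tab.getD (i+2) 0 - tab.getD (i+1) 0) > 0 := by
        intro i hi hlt
        by_cases hie : i + 2 < e
        · exact inv i hi hie
        · have hi2 : i + 2 = e := by omega
          rcases hcond with hx | hx
          · omega
          · have e1 : i + 1 = e - 1 := by omega
            have e0 : i = e - 2 := by omega
            rw [hi2, e1, e0, mul_comm]
            exact hx
      rw [hinner]
      exact IH (tab.length - (e+1)) (by omega) start (e+1) fin (by omega) (by omega) rfl hext
    · -- run breaks at e
      push_neg at hcond
      obtain ⟨hlen, hprod⟩ := hcond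
      have hl : start + 2 ≤ e := by omega
      have hinner : pvInnerB tab start e = e := by
        unfold pvInnerB
        rw [dif_neg]
        rintro ⟨-, hx | hx⟩
        · omega
        · exact absurd hx (by omega)
      have hstep : pvStepA (fin, (pvSeg tab start e).reverse) (tab.getD e 0)
          = (pvNormB (pvSeg tab start e) :: fin, (pvSeg tab e (e+1)).reverse) := by
        rw [pvSeg_rev_shape tab start e hl h2] at *
        simp only [pvStepA, if_neg (by omega : ¬ (tab.getD e 0 - tab.getD (e-1) 0) * (tab.getD (e-1) 0 - tab.getD (e-2) 0) > 0)]
        rw [pvSeg_singleton tab e he]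
        rw [pvNorm_eq tab start e hl h2 inv, pvSeg_rev_shape tab start e hl h2]
        congr 1
        split_ifs with hb
        · rfl
        · rw [← pvSeg_rev_shape tab start e hl h2, List.reverse_reverse]
      rw [hstep]
      have hIH := IH (tab.length - (e+1)) (by omega) e (e+1) (pvNormB (pvSeg tab start e) :: fin)
        (by omega) (by omega) rfl (by intro i hi hlt; omega)
      rw [hIH, hinner]
      have houter : pvOuterB tab e
          = pvNormB (pvSeg tab e (pvInnerB tab e (e+1))) :: pvOuterB tab (pvInnerB tab e (e+1)) := by
        conv_lhs => unfold pvOuterB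
        rw [dif_pos he]
        rfl
      rw [houter]
      simp
  · -- final case: e = length, the loop ends and A handles the last run
    have hdrop : tab.drop e = [] := by
      rw [List.drop_eq_nil_iff]; omega
    have hinner : pvInnerB tab start e = e := by
      unfold pvInnerB
      rw [dif_neg]
      rintro ⟨hx, -⟩
      omega
    have houter : pvOuterB tab e = [] := by
      unfold pvOuterB
      rw [dif_neg (by omega)]
    rw [hdrop, hinner, houter, List.foldl_nil]
    by_cases hl : start + 2 ≤ e
    · rw [pvNorm_eq tab start e hl h2 inv]
      unfold pvFinA
      rw [pvSeg_rev_shape tab start e hl h2]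
      simp only []
      split_ifs with hb
      · rw [← pvSeg_rev_shape tab start e hl h2]
        simp
      · rw [← pvSeg_rev_shape tab start e hl h2, List.reverse_reverse]
        simp
    · have hes : e = start + 1 := by omega
      subst hes
      rw [pvSeg_singleton tab start (by omega)]
      unfold pvNormB pvFinA
      simp

theorem pvTop (tab : List Int) :
    pvFinA (tab.foldl pvStepA ([], [])) = (if tab.length = 0 then [[]] else pvOuterB tab 0) := by
  match tab with
  | [] => rfl
  | t :: rest =>
    rw [if_neg (by simp)]
    have hm := pvMain (t :: rest) ((t :: rest).length - 1) 0 1 [] (by omega) (by simp) rfl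
      (by intro i hi hlt; omega)
    have h2 : (pvSeg (t :: rest) 0 1).reverse = [t] := by simp [pvSeg]
    rw [h2] at hm
    have h0 : (t :: rest).foldl pvStepA ([], []) = ((t :: rest).drop 1).foldl pvStepA ([], [t]) := rfl
    rw [h0, hm]
    conv_rhs => unfold pvOuterB
    rw [dif_pos (by simp)]
    rfl

-- ===== VERDICT (by name: the statement is the Claim_ definition above) =====
theorem sous_tableaux_monotones_spec : Claim_equal_sous_tableaux_monotones := by
  intro tab _
  unfold Spec_sous_tableaux_monotones sous_tableaux_monotones sous_tableaux_monotones_alt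
  exact pvTop tab
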